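-- pv_equiv track=rewrite | github.com/SofiaRomeiro/code-wars | code-wars1.py | regex
-- ===== SOURCE A (Python) =====
-- def regex(s, pattern, closed):
--
-- 	if (s == ''):
-- 		result = ''
-- 		for p in pattern:
-- 			result += p
-- 		return result
--
-- 	elif ord('(') == ord(s[0]):
-- 		pattern.append('')
-- 		return regex(s[1:], pattern, False)
--
-- 	elif ord(')') == ord(s[0]):
-- 		if closed:
-- 			pattern[-2] += pattern[-1]
-- 			return regex(s[1:], pattern[:-1], True)
-- 		return regex(s[1:], pattern, True)
--
-- 	elif (ord(s[0]) == ord('*')) or (ord(s[0]) == ord('?')):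
-- 		if (closed):
-- 			return regex(s[1:], pattern[:-1], False)
-- 		elif not closed and len(pattern) == 1:
-- 			pattern[-1] = pattern[-1][:-1]
-- 			return regex(s[1:], pattern, False)
-- 		else:
-- 			pattern[-2] += pattern[-1][:-1]
-- 			return regex(s[1:], pattern[:-1], False)
--
-- 	elif ord(s[0]) == ord('+'):
-- 		pattern[-2] += pattern[-1]
-- 		return regex(s[1:], pattern[:-1], False)
--
-- 	else:
-- 		pattern[-1] += s[0]
-- 		return regex(s[1:], pattern, False)
-- ===== SOURCE B (Python) =====
-- def regex(s, pattern, closed):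
--     stack = list(pattern)
--     for ch in s:
--         if ch == '(':
--             stack.append('')
--             closed = False
--         elif ch == ')':
--             if closed:
--                 top = stack.pop()
--                 stack[-1] += top
--             closed = True
--         elif ch == '*' or ch == '?':
--             if closed:
--                 stack.pop()
--             elif len(stack) == 1:
--                 stack[-1] = stack[-1][:-1]
--             else:
--                 top = stack.pop()
--                 stack[-1] += top[:-1]
--             closed = False
--         elif ch == '+':
--             top = stack.pop()
--             stack[-1] += top
--             closed = False
--         else:
--             stack[-1] += ch
--             closed = False
--     return ''.join(stack)
-- ===== Notes on version B (the rewrite author's own statement) =====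
-- stated objective: faster
-- what changed: A rebuilds the remaining string with s[1:] at every recursive step; B makes a single iterative left-to-right pass over the characters maintaining an explicit stack with amortized O(1) append/pop, and does not mutate the caller's pattern list (A does).
-- outside the precondition, e.g. on regex('*', [], True): A returns '', B raises IndexError
import Mathlib
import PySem

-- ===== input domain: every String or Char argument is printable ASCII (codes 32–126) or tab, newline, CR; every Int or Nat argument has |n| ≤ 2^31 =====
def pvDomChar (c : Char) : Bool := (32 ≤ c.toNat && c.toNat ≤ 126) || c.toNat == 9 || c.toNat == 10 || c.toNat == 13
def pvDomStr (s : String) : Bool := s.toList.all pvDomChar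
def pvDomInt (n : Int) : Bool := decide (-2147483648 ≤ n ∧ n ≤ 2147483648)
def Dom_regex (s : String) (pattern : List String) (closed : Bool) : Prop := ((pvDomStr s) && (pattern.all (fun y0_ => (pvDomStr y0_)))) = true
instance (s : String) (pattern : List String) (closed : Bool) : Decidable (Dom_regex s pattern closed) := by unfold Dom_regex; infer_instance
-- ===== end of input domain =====

-- B replaces A's slicing recursion (a fresh s[1:] per character) by one iterative left-to-right pass
-- over the characters maintaining an explicit stack; equivalence is about the RETURN value only
-- (A mutates the caller's `pattern` list in place, B leaves it untouched).

-- ===== PORT A =====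
-- pattern[i] for negative i (IndexError → default []; such inputs are outside Pre_regex)
def pyGetNeg (pat : List (List Char)) (i : Int) : List Char := (PySem.List.pyGet? pat i).getD []
-- pattern[i] = v for negative i (IndexError → pat unchanged; such inputs are outside Pre_regex)
def pySet (pat : List (List Char)) (i : Int) (v : List Char) : List (List Char) :=
  match PySem.List.pyIdx? pat.length i with
  | some j => pat.set j v
  | none => pat

-- literal transliteration of A's recursion, character by character on s.toList
def regexA : List Char → List (List Char) → Bool → List Char
  | [], pat, _ => pat.foldl (fun r p => r ++ p) []
  | c :: rest, pat, closed =>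
    if c = '(' then
      regexA rest (pat ++ [[]]) false
    else if c = ')' then
      if closed then
        regexA rest (PySem.List.slice (pySet pat (-2) (pyGetNeg pat (-2) ++ pyGetNeg pat (-1))) none (some (-1))) true
      else regexA rest pat true
    else if c = '*' ∨ c = '?' then
      if closed then
        regexA rest (PySem.List.slice pat none (some (-1))) false
      else if pat.length = 1 then
        regexA rest (pySet pat (-1) (PySem.List.slice (pyGetNeg pat (-1)) none (some (-1)))) false
      else
        regexA rest (PySem.List.slice (pySet pat (-2) (pyGetNeg pat (-2) ++ PySem.List.slice (pyGetNeg pat (-1)) none (some (-1)))) none (some (-1))) false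
    else if c = '+' then
      regexA rest (PySem.List.slice (pySet pat (-2) (pyGetNeg pat (-2) ++ pyGetNeg pat (-1))) none (some (-1))) false
    else
      regexA rest (pySet pat (-1) (pyGetNeg pat (-1) ++ [c])) false

def regex (s : String) (pattern : List String) (closed : Bool) : String :=
  String.ofList (regexA s.toList (pattern.map String.toList) closed)

-- ===== PORT B =====
-- stack[-1] += x  (on an empty stack Python B raises IndexError; outside Pre_regex; modelled as id)
def addToTop : List (List Char) → List Char → List (List Char)
  | [], _ => []
  | [t], x => [t ++ x]
  | y :: r :: rest, x => y :: addToTop (r :: rest) x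

-- one loop iteration of Source B: the state is (stack, closed)
def stepB (st : List (List Char) × Bool) (c : Char) : List (List Char) × Bool :=
  let stack := st.1
  let closed := st.2
  if c = '(' then (stack ++ [[]], false)
  else if c = ')' then
    if closed then (addToTop stack.dropLast (stack.getLastD []), true) else (stack, true)
  else if c = '*' ∨ c = '?' then
    if closed then (stack.dropLast, false)
    else if stack.length = 1 then (stack.dropLast ++ [(stack.getLastD []).dropLast], false)
    else (addToTop stack.dropLast ((stack.getLastD []).dropLast), false)
  else if c = '+' then (addToTop stack.dropLast (stack.getLastD []), false)
  else (addToTop stack [c], false)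

def regex_alt (s : String) (pattern : List String) (closed : Bool) : String :=
  String.ofList (PySem.Chars.join [] (s.toList.foldl stepB (pattern.map String.toList, closed)).1)

-- ===== PRECONDITION & SPEC =====
-- Pre_regex is a well-nestedness condition in the style of balanced parentheses: a scan of s keeping
-- only the group depth (= len(pattern)) and the one-character 'just closed a group' flag, demanding
-- at each operator the depth its stack operations need; on inputs outside it Python A (or B) raises
-- IndexError. It narrows A's returning domain in ONE place, stated here and cited in claim.json:
-- it excludes the inputs that apply '*'/'?' right after a ')' (or with closed=True initially) at
-- depth 0, where A's pattern[:-1] silently no-ops on the empty list but B's natural stack.pop() raises.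
def preOk : List Char → Nat → Bool → Bool
  | [], _, _ => true
  | c :: rest, d, closed =>
    if c = '(' then preOk rest (d + 1) false
    else if c = ')' then
      if closed then decide (2 ≤ d) && preOk rest (d - 1) true else preOk rest d true
    else if c = '*' ∨ c = '?' then
      if closed then decide (1 ≤ d) && preOk rest (d - 1) false
      else if d = 1 then preOk rest d false
      else decide (2 ≤ d) && preOk rest (d - 1) false
    else if c = '+' then decide (2 ≤ d) && preOk rest (d - 1) false
    else decide (1 ≤ d) && preOk rest d false

def Pre_regex (s : String) (pattern : List String) (closed : Bool) : Prop :=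
  preOk s.toList pattern.length closed = true
instance (s : String) (pattern : List String) (closed : Bool) : Decidable (Pre_regex s pattern closed) := by unfold Pre_regex; infer_instance

def pvWitness_regex : String × List String × Bool := ("a(bc)+d*", ["x"], false)

def Spec_regex (s : String) (pattern : List String) (closed : Bool) (out : String) : Prop := out = regex_alt s pattern closed
instance (s : String) (pattern : List String) (closed : Bool) (out : String) : Decidable (Spec_regex s pattern closed out) := by unfold Spec_regex; infer_instance

-- ===== CLAIM (what is proved, stated in full; the proofs are below) =====
def Claim_equal_regex : Prop := ∀ (s : String) (pattern : List String) (closed : Bool), Dom_regex s pattern closed → Pre_regex s pattern closed → Spec_regex s pattern closed (regex s pattern closed)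

-- ===== LEMMAS AND PROOFS =====

theorem addToTop_eq (l : List (List Char)) (x : List Char) (h : l ≠ []) :
    addToTop l x = l.dropLast ++ [l.getLastD [] ++ x] := by
  induction l with
  | nil => simp at h
  | cons y r ih =>
    cases r with
    | nil => simp [addToTop]
    | cons z t => simp [addToTop, ih (by simp)]

theorem set_last {α : Type} (l : List α) (v : α) (h : l ≠ []) :
    l.set (l.length - 1) v = l.dropLast ++ [v] := by
  induction l with
  | nil => simp at h
  | cons y r ih =>
    cases r with
    | nil => simp
    | cons z t =>
      have hr : (z :: t) ≠ [] := by simp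
      have hih := ih hr
      simp only [List.length_cons, Nat.add_sub_cancel] at hih
      simp only [List.length_cons, Nat.add_sub_cancel, List.dropLast_cons₂, List.set_cons_succ, hih]
      rfl

theorem dropLast_set {α : Type} (l : List α) (i : Nat) (v : α) (_h : i < l.length - 1) :
    (l.set i v).dropLast = l.dropLast.set i v := by
  apply List.ext_getElem
  · simp
  · intro n h1 h2
    simp only [List.getElem_dropLast, List.getElem_set]

theorem pyGetNeg_neg_one (pat : List (List Char)) : pyGetNeg pat (-1) = pat.getLastD [] := by
  cases pat with
  | nil => rfl
  | cons y r =>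
    have h2 : -((y :: r).length : Int) ≤ -1 := by simp
    simp only [pyGetNeg, PySem.List.pyGet?, PySem.List.pyIdx?,
      if_neg (by norm_num : ¬ (0:Int) ≤ -1), if_pos h2,
      show (-(-1:Int)).toNat = 1 from rfl, Option.bind]
    rw [← List.getLast?_eq_getElem?, List.getLastD_eq_getLast?]

theorem lastEq (pat : List (List Char)) (x : List Char) :
    pySet pat (-1) (pyGetNeg pat (-1) ++ x) = addToTop pat x := by
  cases pat with
  | nil => rfl
  | cons y r =>
    have hne : (y :: r) ≠ [] := by simp
    rw [addToTop_eq _ _ hne, pyGetNeg_neg_one]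
    have h2 : -((y :: r).length : Int) ≤ -1 := by simp
    simp only [pySet, PySem.List.pyIdx?, if_neg (by norm_num : ¬ (0:Int) ≤ -1), if_pos h2,
      show (-(-1:Int)).toNat = 1 from rfl]
    rw [set_last _ _ hne]

theorem pySet_neg_two (pat : List (List Char)) (v : List Char) (h2 : 2 ≤ pat.length) :
    pySet pat (-2) v = pat.set (pat.length - 2) v := by
  simp only [pySet, PySem.List.pyIdx?]
  have h1 : ¬ (0:Int) ≤ -2 := by norm_num
  have hb : -(pat.length : Int) ≤ -2 := by omega
  simp only [h1, if_false, hb, if_true, show (-(-2:Int)).toNat = 2 from rfl]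

theorem pyGetNeg_neg_two (pat : List (List Char)) :
    pyGetNeg pat (-2) = pat.dropLast.getLastD [] := by
  by_cases h2 : 2 ≤ pat.length
  · simp only [pyGetNeg, PySem.List.pyGet?, PySem.List.pyIdx?]
    have h1 : ¬ (0:Int) ≤ -2 := by norm_num
    have hb : -(pat.length : Int) ≤ -2 := by omega
    simp only [h1, if_false, hb, if_true, show (-(-2:Int)).toNat = 2 from rfl, Option.bind]
    have hdne : pat.dropLast ≠ [] := by
      cases pat with
      | nil => simp at h2
      | cons a r => cases r with
        | nil => simp at h2
        | cons b t => simp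
    have hlast : pat.dropLast.getLast? = pat.dropLast[pat.length - 2]? := by
      rw [List.getLast?_eq_getElem?]
      congr 1
      simp only [List.length_dropLast]
      omega
    have hidx : pat.dropLast[pat.length - 2]? = pat[pat.length - 2]? := by
      rw [List.getElem?_dropLast, if_pos (by omega)]
    rw [← hidx, ← hlast, List.getLastD_eq_getLast?]
  · have : pat = [] ∨ pat.length = 1 := by
      cases pat with
      | nil => exact Or.inl rfl
      | cons a r => right; simp at h2 ⊢; omega
    rcases this with h | h
    · subst h; rfl
    · obtain ⟨a, ha⟩ := List.length_eq_one_iff.mp h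
      subst ha; rfl

theorem mergeEq (pat : List (List Char)) (x : List Char) :
    PySem.List.slice (pySet pat (-2) (pyGetNeg pat (-2) ++ x)) none (some (-1)) = addToTop pat.dropLast x := by
  by_cases h2 : 2 ≤ pat.length
  · rw [PySem.List.slice_to_neg_one, pySet_neg_two _ _ h2, pyGetNeg_neg_two]
    have hdne : pat.dropLast ≠ [] := by
      cases pat with
      | nil => simp at h2
      | cons a r => cases r with
        | nil => simp at h2
        | cons b t => simp
    rw [addToTop_eq _ _ hdne]
    rw [dropLast_set _ _ _ (by omega)]
    have hlen : pat.length - 2 = pat.dropLast.length - 1 := by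
      simp only [List.length_dropLast]
      omega
    rw [hlen, set_last _ _ hdne]
  · have : pat = [] ∨ pat.length = 1 := by
      cases pat with
      | nil => exact Or.inl rfl
      | cons a r => right; simp at h2 ⊢; omega
    rcases this with h | h
    · subst h; rfl
    · obtain ⟨a, ha⟩ := List.length_eq_one_iff.mp h
      subst ha; rfl

theorem join_nil_eq_flatten (parts : List (List Char)) :
    PySem.Chars.join [] parts = parts.flatten := by
  induction parts with
  | nil => simp [PySem.Chars.join_nil]
  | cons a r ih =>
    cases r with
    | nil => simp [PySem.Chars.join_singleton]
    | cons b t =>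
      rw [PySem.Chars.join_cons_cons, ih]
      simp

theorem main_eq (cs : List Char) (pat : List (List Char)) (closed : Bool) :
    regexA cs pat closed = PySem.Chars.join [] (cs.foldl stepB (pat, closed)).1 := by
  induction cs generalizing pat closed with
  | nil =>
    simp only [regexA, List.foldl_nil, join_nil_eq_flatten]
    rw [PySem.List.foldl_append_eq_flatten]
    simp
  | cons c rest ih =>
    simp only [List.foldl_cons]
    show regexA (c :: rest) pat closed = _
    rw [regexA]
    by_cases hp : c = '('
    · simp only [hp, ih]
      simp [stepB]
    · rw [if_neg hp]
      by_cases hcl : c = ')'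
      · rw [if_pos hcl]
        cases closed with
        | true =>
          simp only [ih, mergeEq, pyGetNeg_neg_one]
          simp [stepB, hcl]
        | false =>
          simp only [Bool.false_eq_true, if_neg (by simp : ¬False), ih]
          simp [stepB, hcl]
      · rw [if_neg hcl]
        by_cases hst : c = '*' ∨ c = '?'
        · rw [if_pos hst]
          cases closed with
          | true =>
            simp only [ih, PySem.List.slice_to_neg_one]
            simp [stepB, hp, hcl, hst]
          | false =>
            by_cases hl : pat.length = 1
            · rw [if_neg (by simp), if_pos hl, ih]
              obtain ⟨a, ha⟩ := List.length_eq_one_iff.mp hl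
              subst ha
              simp [stepB, hp, hcl, hst, pySet, PySem.List.pyIdx?, pyGetNeg_neg_one, PySem.List.slice_to_neg_one]
            · rw [if_neg (by simp), if_neg hl, ih, mergeEq, pyGetNeg_neg_one]
              simp [stepB, hp, hcl, hst, hl, PySem.List.slice_to_neg_one]
        · rw [if_neg hst]
          by_cases hpl : c = '+'
          · rw [if_pos hpl, ih, mergeEq, pyGetNeg_neg_one]
            simp [stepB, hpl]
          · rw [if_neg hpl, ih, lastEq]
            simp [stepB, hp, hcl, hst, hpl]

theorem regex_spec : Claim_equal_regex := by
  intro s pattern closed _ _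
  unfold Spec_regex regex regex_alt
  rw [main_eq]
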